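-- pv_equiv track=rewrite | github.com/cxMoonGlade/qcbm-ansatz-benchmark | src/train/mmdagg_probs.py | _ids_for_kernel
-- ===== SOURCE A (Python) =====
-- _KID = dict(laplace=0, gaussian=1, imq=2,
--             matern05=3, matern15=4, matern25=5)
--
-- _MID = {"l1": 0, "l2": 1}                        # metric id
--
-- def _ids_for_kernel(flag: str, n_bw: int):
--     def seq(kname, metric):
--         k = _KID[kname]; m = _MID[metric]
--         return [k] * n_bw, [m] * n_bw
--
--     if flag == "laplace_gaussian":
--         k1, m1 = seq("laplace",  "l1")
--         k2, m2 = seq("gaussian", "l2")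
--         return k1 + k2, m1 + m2
--
--     if flag == "gaussian_laplace":
--         k1, m1 = seq("gaussian", "l2")
--         k2, m2 = seq("laplace",  "l1")
--         return k1 + k2, m1 + m2
--
--     if flag == "all":
--         names = [
--             ("laplace",   "l1"),
--             ("gaussian",  "l2"),
--             ("imq",       "l2"),
--             ("matern05",  "l1"), ("matern15", "l1"), ("matern25", "l1"),
--             ("matern05",  "l2"), ("matern15", "l2"), ("matern25", "l2"),
--         ]
--         k_ids, m_ids = [], []
--         for kname, metric in names:
--             k_vec, m_vec = seq(kname, metric)
--             k_ids += k_vec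
--             m_ids += m_vec
--         return k_ids, m_ids
--
--     raise ValueError(f"Unknown kernel flag '{flag}'")
-- ===== SOURCE B (Python) =====
-- _PATTERNS = {
--     "laplace_gaussian": ([0, 1], [0, 1]),
--     "gaussian_laplace": ([1, 0], [1, 0]),
--     "all": ([0, 1, 2, 3, 4, 5, 3, 4, 5],
--             [0, 1, 1, 0, 0, 0, 1, 1, 1]),
-- }
--
-- def _ids_for_kernel(flag: str, n_bw: int):
--     try:
--         kpat, mpat = _PATTERNS[flag]
--     except KeyError:
--         raise ValueError(f"Unknown kernel flag '{flag}'")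
--     total = len(kpat) * n_bw
--     return ([kpat[i // n_bw] for i in range(total)],
--             [mpat[i // n_bw] for i in range(total)])
-- ===== Notes on version B (the rewrite author's own statement) =====
-- stated objective: alternative
-- what changed: Replaces the per-(name,metric)-pair dict lookups with precomputed flat integer id patterns per flag, and fills both output lists in a single flat-index comprehension using pattern[i // n_bw] over range(len(pattern)*n_bw); unknown flags raise the same ValueError.
import Mathlib
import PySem

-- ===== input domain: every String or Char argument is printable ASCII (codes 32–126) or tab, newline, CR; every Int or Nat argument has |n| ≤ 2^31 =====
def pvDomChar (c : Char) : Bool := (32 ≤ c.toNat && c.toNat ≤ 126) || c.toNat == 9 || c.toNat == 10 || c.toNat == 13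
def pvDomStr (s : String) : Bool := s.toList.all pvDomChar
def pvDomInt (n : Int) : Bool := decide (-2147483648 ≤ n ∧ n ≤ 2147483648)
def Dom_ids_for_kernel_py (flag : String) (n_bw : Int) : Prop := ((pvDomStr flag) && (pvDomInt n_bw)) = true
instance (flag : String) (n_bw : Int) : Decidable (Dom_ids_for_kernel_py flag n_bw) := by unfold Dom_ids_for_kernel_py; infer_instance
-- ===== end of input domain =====

-- B precomputes flat integer id patterns per flag and fills both output lists by flat index (i // n_bw),
-- instead of A's per-(name,metric)-pair dict lookups with replicate-and-append; objective: alternative.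

-- ===== PORT A =====
-- module-level dicts _KID and _MID
def pvKID : PySem.Dict String Int :=
  PySem.Dict.ofList [("laplace", 0), ("gaussian", 1), ("imq", 2),
                     ("matern05", 3), ("matern15", 4), ("matern25", 5)]

def pvMID : PySem.Dict String Int := PySem.Dict.ofList [("l1", 0), ("l2", 1)]

-- inner helper `seq`; keys are always present, so getD 0 is never hit.
-- Python's `[k] * n_bw` is empty for n_bw ≤ 0: List.replicate n_bw.toNat is exact.
def pvSeqA (n_bw : Int) (kname metric : String) : List Int × List Int :=
  let k := (PySem.Dict.get? pvKID kname).getD 0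
  let m := (PySem.Dict.get? pvMID metric).getD 0
  (List.replicate n_bw.toNat k, List.replicate n_bw.toNat m)

def ids_for_kernel_py (flag : String) (n_bw : Int) : List Int × List Int :=
  if flag = "laplace_gaussian" then
    let (k1, m1) := pvSeqA n_bw "laplace" "l1"
    let (k2, m2) := pvSeqA n_bw "gaussian" "l2"
    (k1 ++ k2, m1 ++ m2)
  else if flag = "gaussian_laplace" then
    let (k1, m1) := pvSeqA n_bw "gaussian" "l2"
    let (k2, m2) := pvSeqA n_bw "laplace" "l1"
    (k1 ++ k2, m1 ++ m2)
  else if flag = "all" then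
    let names : List (String × String) :=
      [("laplace", "l1"), ("gaussian", "l2"), ("imq", "l2"),
       ("matern05", "l1"), ("matern15", "l1"), ("matern25", "l1"),
       ("matern05", "l2"), ("matern15", "l2"), ("matern25", "l2")]
    names.foldl (fun acc p =>
      let (kv, mv) := pvSeqA n_bw p.1 p.2
      (acc.1 ++ kv, acc.2 ++ mv)) ([], [])
  else ([], [])  -- Python raises ValueError here; excluded by Pre_

-- ===== PORT B =====
def pvPatterns : PySem.Dict String (List Int × List Int) :=
  PySem.Dict.ofList
    [("laplace_gaussian", ([0, 1], [0, 1])),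
     ("gaussian_laplace", ([1, 0], [1, 0])),
     ("all", ([0, 1, 2, 3, 4, 5, 3, 4, 5],
              [0, 1, 1, 0, 0, 0, 1, 1, 1]))]

def ids_for_kernel_py_alt (flag : String) (n_bw : Int) : List Int × List Int :=
  match PySem.Dict.get? pvPatterns flag with
  | none => ([], [])  -- Python raises ValueError here; excluded by Pre_
  | some (kpat, mpat) =>
    let total : Int := (kpat.length : Int) * n_bw
    ((PySem.List.pyRange 0 total 1).map
        (fun i => (PySem.List.pyGet? kpat (PySem.Int.floordiv i n_bw)).getD 0),
     (PySem.List.pyRange 0 total 1).map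
        (fun i => (PySem.List.pyGet? mpat (PySem.Int.floordiv i n_bw)).getD 0))

-- ===== PRECONDITION & SPEC =====
-- A raises ValueError("Unknown kernel flag …") on any other flag; Pre_ admits exactly the three handled flags.
def Pre_ids_for_kernel_py (flag : String) (n_bw : Int) : Prop :=
  flag = "laplace_gaussian" ∨ flag = "gaussian_laplace" ∨ flag = "all"
instance (flag : String) (n_bw : Int) : Decidable (Pre_ids_for_kernel_py flag n_bw) := by
  unfold Pre_ids_for_kernel_py; infer_instance

def pvWitness_ids_for_kernel_py : String × Int := ("all", 2)

def Spec_ids_for_kernel_py (flag : String) (n_bw : Int) (out : List Int × List Int) : Prop := out = ids_for_kernel_py_alt flag n_bw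
instance (flag : String) (n_bw : Int) (out : List Int × List Int) : Decidable (Spec_ids_for_kernel_py flag n_bw out) := by unfold Spec_ids_for_kernel_py; infer_instance

-- ===== CLAIM =====
def Claim_equal_ids_for_kernel_py : Prop := ∀ (flag : String) (n_bw : Int), Dom_ids_for_kernel_py flag n_bw → Pre_ids_for_kernel_py flag n_bw → Spec_ids_for_kernel_py flag n_bw (ids_for_kernel_py flag n_bw)

-- ===== LEMMAS AND PROOFS =====
-- Nat-level core: filling by flat index j / n equals repeating each pattern entry n times.
theorem pvNatFill (p : List Int) (n : Nat) (hn : 0 < n) :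
    (List.range (p.length * n)).map (fun j => (p[j / n]?).getD 0)
      = p.flatMap (fun x => List.replicate n x) := by
  induction p with
  | nil => simp
  | cons x p ih =>
    have hlen : (x :: p).length * n = n + p.length * n := by
      simp [List.length_cons]; ring
    rw [hlen, List.range_add, List.map_append, List.map_map]
    congr 1
    · have h1 : (List.range n).map (fun j => ((x :: p)[j / n]?).getD 0)
          = (List.range n).map (fun _ => x) := by
        apply List.map_congr_left
        intro j hj
        have : j / n = 0 := Nat.div_eq_of_lt (List.mem_range.mp hj)
        simp [this]
      rw [h1, List.map_const', List.length_range]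
    · have h2 : ∀ j, ((fun j => ((x :: p)[j / n]?).getD 0) ∘ (fun k => n + k)) j
          = (fun j => (p[j / n]?).getD 0) j := by
        intro j
        have : (n + j) / n = j / n + 1 := by
          rw [Nat.add_comm, Nat.add_div_right _ hn]
        simp [Function.comp, this]
      rw [List.map_congr_left (fun j _ => h2 j), ih, List.flatMap_def]

-- Int bridge: B's flat-index comprehension equals flatMap-replicate for every n : Int.
theorem pvIntFill (p : List Int) (n : Int) :
    (PySem.List.pyRange 0 ((p.length : Int) * n) 1).map
        (fun i => (PySem.List.pyGet? p (PySem.Int.floordiv i n)).getD 0)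
      = p.flatMap (fun x => List.replicate n.toNat x) := by
  by_cases hn : n ≤ 0
  · have h1 : (p.length : Int) * n ≤ 0 := mul_nonpos_of_nonneg_of_nonpos (by positivity) hn
    rw [PySem.List.pyRange_one_eq_nil h1]
    have : n.toNat = 0 := Int.toNat_of_nonpos hn
    simp [this, List.flatMap]
  · have hn : 0 < n := by omega
    have hcast : (p.length : Int) * n = ((p.length * n.toNat : Nat) : Int) := by
      push_cast [Int.toNat_of_nonneg hn.le]; ring
    rw [hcast, PySem.List.pyRange_zero_natCast, List.map_map]
    have hfun : ∀ k ∈ List.range (p.length * n.toNat),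
        ((fun i => (PySem.List.pyGet? p (PySem.Int.floordiv i n)).getD 0) ∘
          (fun k : Nat => (k : Int))) k
        = (fun j => (p[j / n.toNat]?).getD 0) k := by
      intro k _
      have hn' : n = ((n.toNat : Nat) : Int) := (Int.toNat_of_nonneg hn.le).symm
      rw [Function.comp_apply, hn', PySem.Int.floordiv_natCast, PySem.List.pyGet?_natCast]
      simp [max_eq_left hn.le]
    rw [List.map_congr_left hfun]
    exact pvNatFill p n.toNat (by omega)

-- dict lookups as decided facts
theorem pvPat_lg : PySem.Dict.get? pvPatterns "laplace_gaussian" = some ([0, 1], [0, 1]) := by decide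
theorem pvPat_gl : PySem.Dict.get? pvPatterns "gaussian_laplace" = some ([1, 0], [1, 0]) := by decide
theorem pvPat_all : PySem.Dict.get? pvPatterns "all" = some ([0, 1, 2, 3, 4, 5, 3, 4, 5], [0, 1, 1, 0, 0, 0, 1, 1, 1]) := by decide
theorem pvKID_laplace : PySem.Dict.get? pvKID "laplace" = some 0 := by decide
theorem pvKID_gaussian : PySem.Dict.get? pvKID "gaussian" = some 1 := by decide
theorem pvKID_imq : PySem.Dict.get? pvKID "imq" = some 2 := by decide
theorem pvKID_m05 : PySem.Dict.get? pvKID "matern05" = some 3 := by decide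
theorem pvKID_m15 : PySem.Dict.get? pvKID "matern15" = some 4 := by decide
theorem pvKID_m25 : PySem.Dict.get? pvKID "matern25" = some 5 := by decide
theorem pvMID_l1 : PySem.Dict.get? pvMID "l1" = some 0 := by decide
theorem pvMID_l2 : PySem.Dict.get? pvMID "l2" = some 1 := by decide

-- ===== VERDICT =====
theorem ids_for_kernel_py_spec : Claim_equal_ids_for_kernel_py := by
  intro flag n_bw _ hpre
  unfold Spec_ids_for_kernel_py
  rcases hpre with h | h | h <;> subst h
  · have hk := pvIntFill [0, 1] n_bw
    norm_num [List.flatMap] at hk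
    simp [ids_for_kernel_py, ids_for_kernel_py_alt, pvSeqA, pvPat_lg,
      pvKID_laplace, pvKID_gaussian, pvMID_l1, pvMID_l2, hk]
  · have hk := pvIntFill [1, 0] n_bw
    norm_num [List.flatMap] at hk
    simp [ids_for_kernel_py, ids_for_kernel_py_alt, pvSeqA, pvPat_gl,
      pvKID_laplace, pvKID_gaussian, pvMID_l1, pvMID_l2, hk]
  · have hk := pvIntFill [0, 1, 2, 3, 4, 5, 3, 4, 5] n_bw
    have hm := pvIntFill [0, 1, 1, 0, 0, 0, 1, 1, 1] n_bw
    norm_num [List.flatMap, -List.replicate_append_replicate] at hk hm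
    simp [ids_for_kernel_py, ids_for_kernel_py_alt, pvSeqA, List.foldl, pvPat_all,
      pvKID_laplace, pvKID_gaussian, pvKID_imq, pvKID_m05, pvKID_m15, pvKID_m25,
      pvMID_l1, pvMID_l2, hk, hm, List.append_assoc, -List.replicate_append_replicate]
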